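-- pv_equiv track=rewrite | github.com/ivanwakeup/algorithms | algorithms/prep/microsoft/max_inserts_string_without_3_consec.py | max_inserts_string_3_chars
-- ===== SOURCE A (Python) =====
-- def max_inserts_string_3_chars(s):
--     result = 0
--     count = 0
--     for char in s:
--         if char == 'a':
--             count+=1
--             if count == 3:
--                 return -1
--         else:
--             result += 2 - count
--             count = 0
--
--     result += 2-count
--     return result
-- ===== SOURCE B (Python) =====
-- def max_inserts_string_3_chars(s):
--     if 'aaa' in s:
--         return -1
--     na = s.count('a')
--     return 2 * (len(s) - na + 1) - na
-- ===== Notes on version B (the rewrite author's own statement) =====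
-- stated objective: simpler
-- what changed: Replaces the running-count character loop with a closed form: a single 'aaa' substring test decides -1, otherwise the answer is computed arithmetically from len(s) and s.count('a').
import Mathlib
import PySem

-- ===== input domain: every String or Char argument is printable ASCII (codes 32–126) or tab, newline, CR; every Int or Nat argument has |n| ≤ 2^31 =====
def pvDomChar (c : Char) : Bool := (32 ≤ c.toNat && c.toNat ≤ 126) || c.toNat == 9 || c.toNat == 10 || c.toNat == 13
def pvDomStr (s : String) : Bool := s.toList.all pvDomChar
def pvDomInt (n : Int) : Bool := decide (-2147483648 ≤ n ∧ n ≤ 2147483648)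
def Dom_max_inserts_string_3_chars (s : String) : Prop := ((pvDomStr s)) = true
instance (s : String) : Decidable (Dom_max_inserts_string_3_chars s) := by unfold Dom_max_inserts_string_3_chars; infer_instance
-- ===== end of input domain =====

-- B replaces A's running-count loop by a closed form ('aaa' substring test + character count); same O(n) cost, simpler.

-- ===== PORT A =====
-- literal transliteration of A's loop: state (result, count), early return -1 when a run of 'a' reaches 3
def maxInsGoA : List Char → Int → Int → Int
  | [], result, count => result + (2 - count)
  | c :: rest, result, count =>
    if c = 'a' then
      if count + 1 = 3 then -1 else maxInsGoA rest result (count + 1)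
    else
      maxInsGoA rest (result + (2 - count)) 0

def max_inserts_string_3_chars (s : String) : Int :=
  maxInsGoA s.toList 0 0

-- ===== PORT B =====
def max_inserts_string_3_chars_alt (s : String) : Int :=
  if PySem.Str.isIn "aaa" s then -1
  else
    let na : Int := PySem.Str.count s "a"
    2 * ((PySem.Str.len s : Int) - na + 1) - na

-- ===== PRECONDITION & SPEC =====
def Spec_max_inserts_string_3_chars (s : String) (out : Int) : Prop := out = max_inserts_string_3_chars_alt s
instance (s : String) (out : Int) : Decidable (Spec_max_inserts_string_3_chars s out) := by unfold Spec_max_inserts_string_3_chars; infer_instance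

-- ===== CLAIM (what is proved, stated in full; the proofs are below) =====
def Claim_equal_max_inserts_string_3_chars : Prop := ∀ (s : String), Dom_max_inserts_string_3_chars s → Spec_max_inserts_string_3_chars s (max_inserts_string_3_chars s)

-- ===== LEMMAS AND PROOFS =====

-- Python's s.count('a') counts occurrences of the single character 'a'
lemma countgo_single (fuel : Nat) : ∀ (l : List Char) (acc : Nat), l.length ≤ fuel →
    PySem.Chars.count.go ['a'] fuel l acc = acc + l.count 'a' := by
  induction fuel with
  | zero =>
    intro l acc h
    have : l = [] := List.eq_nil_of_length_eq_zero (Nat.le_zero.mp h)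
    subst this; simp [PySem.Chars.count.go]
  | succ n ih =>
    intro l acc h
    cases l with
    | nil => simp [PySem.Chars.count.go]
    | cons c t =>
      by_cases hc : c = 'a'
      · subst hc
        have hp : List.isPrefixOf ['a'] ('a' :: t) = true := by
          simp [List.isPrefixOf]
        rw [PySem.Chars.count.go, if_pos hp]
        rw [show List.drop (['a'].length) ('a' :: t) = t from rfl]
        simp only [List.length_cons] at h
        rw [ih t (acc + 1) (by omega)]
        simp
        omega
      · have hp : List.isPrefixOf ['a'] (c :: t) = false := by
          simp [List.isPrefixOf]
          exact fun h => hc h.symm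
        rw [PySem.Chars.count.go, if_neg (by simp [hp])]
        simp only [List.length_cons] at h
        rw [ih t acc (by omega)]
        simp [hc]

lemma count_a_eq (l : List Char) : PySem.Chars.count l ['a'] = l.count 'a' := by
  unfold PySem.Chars.count
  rw [if_neg (by simp)]
  simpa using countgo_single l.length l 0 (le_refl _)

-- removing a leading block of at most 2 'a's and one non-'a' preserves the 'aaa'-infix test
lemma infix_skip (c : Nat) (hc : c ≤ 2) (x : Char) (hx : x ≠ 'a') (rest : List Char) :
    (['a','a','a'] <:+: (List.replicate c 'a' ++ x :: rest)) ↔ ['a','a','a'] <:+: rest := by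
  have hx' : ¬ ('a' = x) := fun h => hx h.symm
  interval_cases c <;>
    simp [List.infix_cons_iff, List.cons_prefix_cons, hx']

-- the loop invariant: with carry c (0 ≤ c ≤ 2) of pending 'a's, A's loop returns -1 exactly when
-- 'aaa' occurs in (carry ++ cs), and otherwise the closed form
lemma goA_closed (cs : List Char) : ∀ (result : Int) (c : Nat), c ≤ 2 →
    maxInsGoA cs result c =
      if ['a','a','a'] <:+: (List.replicate c 'a' ++ cs) then -1
      else result + 2 * ((cs.length : Int) - cs.count 'a' + 1) - c - cs.count 'a' := by
  induction cs with
  | nil =>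
    intro result c hc
    have hni : ¬ (['a','a','a'] <:+: List.replicate c 'a') := by
      intro h
      have := h.length_le
      simp at this
      omega
    simp only [maxInsGoA, List.append_nil]
    rw [if_neg hni]
    simp
    ring
  | cons x rest ih =>
    intro result c hc
    by_cases hx : x = 'a'
    · subst hx
      have hrepl : List.replicate c 'a' ++ 'a' :: rest = List.replicate (c + 1) 'a' ++ rest := by
        rw [List.replicate_succ']
        simp
      by_cases h2 : c = 2
      · subst h2
        have hpos : ['a','a','a'] <:+: (List.replicate 2 'a' ++ 'a' :: rest) := by
          refine ⟨[], rest, ?_⟩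
          simp [List.replicate]
        rw [if_pos hpos]
        simp [maxInsGoA]
      · have hlt : c + 1 ≤ 2 := by omega
        have h3 : ¬ ((c : Int) + 1 = 3) := by omega
        have hstep : maxInsGoA ('a' :: rest) result (c : Int) =
            maxInsGoA rest result ((c : Int) + 1) := by
          simp [maxInsGoA, h3]
        rw [hstep, show ((c : Int) + 1) = ((c + 1 : Nat) : Int) from by push_cast; ring,
          ih result (c + 1) hlt, hrepl]
        by_cases hin : ['a','a','a'] <:+: (List.replicate (c + 1) 'a' ++ rest)
        · rw [if_pos hin, if_pos hin]
        · rw [if_neg hin, if_neg hin]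
          simp
          ring
    · simp only [maxInsGoA, if_neg hx]
      have h0 := ih (result + (2 - (c : Int))) 0 (by omega)
      simp only [Nat.cast_zero, List.replicate_zero, List.nil_append] at h0
      rw [h0]
      rw [if_congr (infix_skip c hc x hx rest) rfl rfl]
      by_cases hin : ['a','a','a'] <:+: rest
      · rw [if_pos hin, if_pos (by simpa using hin)]
      · rw [if_neg hin, if_neg (by simpa using hin)]
        simp [hx]
        ring

-- ===== VERDICT (by name: the statement is the Claim_ definition above) =====
theorem max_inserts_string_3_chars_spec : Claim_equal_max_inserts_string_3_chars := by
  intro s _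
  unfold Spec_max_inserts_string_3_chars max_inserts_string_3_chars max_inserts_string_3_chars_alt
  have hA := goA_closed s.toList 0 0 (by omega)
  simp only [Nat.cast_zero, List.replicate_zero, List.nil_append] at hA
  rw [hA]
  have hisin : PySem.Str.isIn "aaa" s = PySem.Chars.isIn ['a','a','a'] s.toList := rfl
  have hcount : (PySem.Str.count s "a" : Int) = (s.toList.count 'a' : Int) := by
    unfold PySem.Str.count
    rw [show ("a" : String).toList = ['a'] from rfl, count_a_eq]
  by_cases hin : ['a','a','a'] <:+: s.toList
  · rw [if_pos hin, if_pos (by rw [hisin]; exact (PySem.Chars.isIn_iff_infix _ _).mpr hin)]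
  · rw [if_neg hin, if_neg (by rw [hisin]; simpa using (PySem.Chars.isIn_eq_false_iff _ _).mpr hin)]
    simp only [hcount]
    rw [show (PySem.Str.len s : Int) = (s.toList.length : Int) from by
      rw [show PySem.Str.len s = PySem.Chars.len s.toList from rfl, PySem.Chars.len_eq]]
    ring
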